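-- pv_equiv track=rewrite | github.com/janghoonp12/boj | 백준/Gold/2143. 두 배열의 합/두 배열의 합.py | function
-- ===== SOURCE A (Python) =====
-- def function(t, n, arr1, m, arr2):
--     arr1 = [0] + arr1
--     arr2 = [0] + arr2
--
--     prefix1 = [0 for i in range(n + 1)]
--     for i in range(1, n + 1):
--         prefix1[i] = prefix1[i - 1] + arr1[i]
--     cnt1 = {}
--     for i in range(n):
--         for j in range(i + 1, n + 1):
--             k = prefix1[j] - prefix1[i]
--             cnt1[k] = cnt1.get(k, 0) + 1
--
--     ans = 0
--     prefix2 = [0 for i in range(m + 1)]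
--     for i in range(1, m + 1):
--         prefix2[i] = prefix2[i - 1] + arr2[i]
--     for i in range(m):
--         for j in range(i + 1, m + 1):
--             k = prefix2[j] - prefix2[i]
--             ans += cnt1.get(t - k, 0)
--
--     return ans
-- ===== SOURCE B (Python) =====
-- def function(t, n, arr1, m, arr2):
--     # Sort-and-binary-search instead of a hash counter: sort all subarray sums
--     # of arr1 once, then count matches for each subarray sum of arr2 as
--     # bound(<= v) - bound(< v) with a bisection over the sorted array.
--     s1 = sorted(sum(arr1[i:j]) for i in range(n) for j in range(i + 1, n + 1))
--
--     def bound(ok):  # first index k with not ok(s1[k])  (ok is downward closed on s1)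
--         lo, hi = 0, len(s1)
--         while lo < hi:
--             mid = (lo + hi) // 2
--             if ok(s1[mid]):
--                 lo = mid + 1
--             else:
--                 hi = mid
--         return lo
--
--     ans = 0
--     for i in range(m):
--         for j in range(i + 1, m + 1):
--             v = t - sum(arr2[i:j])
--             ans += bound(lambda x: x <= v) - bound(lambda x: x < v)
--     return ans
-- ===== Notes on version B (the rewrite author's own statement) =====
-- stated objective: alternative
-- what changed: B replaces A's hash-counter of arr1's subarray sums by a sorted array queried with a hand-rolled bisection (count = bound(<=v) - bound(<v)) for each subarray sum of arr2, and computes subarray sums directly from slices instead of prefix tables.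
import Mathlib
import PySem

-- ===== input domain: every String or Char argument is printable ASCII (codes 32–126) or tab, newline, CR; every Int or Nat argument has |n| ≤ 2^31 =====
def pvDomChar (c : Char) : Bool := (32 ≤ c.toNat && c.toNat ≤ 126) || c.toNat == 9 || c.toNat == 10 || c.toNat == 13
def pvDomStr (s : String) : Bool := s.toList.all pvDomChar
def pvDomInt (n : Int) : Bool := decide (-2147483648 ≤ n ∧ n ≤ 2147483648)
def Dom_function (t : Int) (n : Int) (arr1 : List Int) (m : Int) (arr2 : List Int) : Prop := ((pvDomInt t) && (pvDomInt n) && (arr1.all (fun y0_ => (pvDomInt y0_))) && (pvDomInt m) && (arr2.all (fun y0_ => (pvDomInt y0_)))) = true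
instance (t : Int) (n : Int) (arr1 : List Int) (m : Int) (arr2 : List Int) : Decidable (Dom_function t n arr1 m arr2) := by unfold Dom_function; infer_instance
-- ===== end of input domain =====

-- B replaces A's hash counter of arr1's subarray sums by a sorted array queried
-- with a hand-rolled bisection (count = bound(≤v) − bound(<v)) for each subarray
-- sum of arr2, computing the sums from slices instead of prefix tables (objective: alternative).

-- ===== PORT A =====
def function (t : Int) (n : Int) (arr1 : List Int) (m : Int) (arr2 : List Int) : Int :=
  let a1 := 0 :: arr1
  let a2 := 0 :: arr2
  let prefix1 := (PySem.List.pyRange 1 (n + 1)).foldl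
    (fun p i => PySem.List.pySetD p i (PySem.List.pyGetD p (i - 1) 0 + PySem.List.pyGetD a1 i 0))
    (List.replicate (n + 1).toNat 0)
  let cnt1 := (PySem.List.pyRange 0 n).foldl
    (fun d i => (PySem.List.pyRange (i + 1) (n + 1)).foldl
      (fun d j =>
        let k := PySem.List.pyGetD prefix1 j 0 - PySem.List.pyGetD prefix1 i 0
        d.insert k (d.getD k 0 + 1)) d)
    (PySem.Dict.empty : PySem.Dict Int Int)
  let prefix2 := (PySem.List.pyRange 1 (m + 1)).foldl
    (fun p i => PySem.List.pySetD p i (PySem.List.pyGetD p (i - 1) 0 + PySem.List.pyGetD a2 i 0))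
    (List.replicate (m + 1).toNat 0)
  (PySem.List.pyRange 0 m).foldl
    (fun ans i => (PySem.List.pyRange (i + 1) (m + 1)).foldl
      (fun ans j =>
        let k := PySem.List.pyGetD prefix2 j 0 - PySem.List.pyGetD prefix2 i 0
        ans + cnt1.getD (t - k) 0) ans)
    0

-- ===== PORT B =====
-- the sorted-sums helpers of Source B
-- 'sum(xs[i:j]) for i in range(N) for j in range(i+1, N+1)' (B's generator expression)
def subSums (xs : List Int) (N : Int) : List Int :=
  (PySem.List.pyRange 0 N).flatMap (fun i =>
    (PySem.List.pyRange (i + 1) (N + 1)).map (fun j =>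
      (PySem.List.slice xs (some i) (some j)).sum))

-- Source B's 'bound(ok)': binary search for the first index whose element fails ok
def bound (s1 : List Int) (ok : Int → Bool) (lo hi : Int) : Int :=
  if h : lo < hi then
    -- mid = (lo + hi) // 2
    if ok (PySem.List.pyGetD s1 (PySem.Int.floordiv (lo + hi) 2) 0) then
      bound s1 ok (PySem.Int.floordiv (lo + hi) 2 + 1) hi
    else bound s1 ok lo (PySem.Int.floordiv (lo + hi) 2)
  else lo
termination_by (hi - lo).toNat
decreasing_by
  · have h1 : lo ≤ PySem.Int.floordiv (lo + hi) 2 :=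
      (PySem.Int.le_floordiv_iff_mul_le (by norm_num)).mpr (by linarith)
    omega
  · have h2 : PySem.Int.floordiv (lo + hi) 2 < hi :=
      (PySem.Int.floordiv_lt_iff_lt_mul (by norm_num)).mpr (by linarith)
    omega

def function_alt (t : Int) (n : Int) (arr1 : List Int) (m : Int) (arr2 : List Int) : Int :=
  let s1 := PySem.List.sorted (subSums arr1 n) (fun x => x) false
  (PySem.List.pyRange 0 m).foldl
    (fun ans i => (PySem.List.pyRange (i + 1) (m + 1)).foldl
      (fun ans j =>
        let v := t - (PySem.List.slice arr2 (some i) (some j)).sum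
        ans + (bound s1 (fun x => decide (x ≤ v)) 0 (PySem.List.len s1)
               - bound s1 (fun x => decide (x < v)) 0 (PySem.List.len s1))) ans)
    0

-- ===== PRECONDITION & SPEC =====
-- A indexes the arrays at positions up to n (resp. m) while building its prefix
-- tables; it raises IndexError when n > len(arr1) or m > len(arr2), so exactly
-- those inputs are excluded.
def Pre_function (t : Int) (n : Int) (arr1 : List Int) (m : Int) (arr2 : List Int) : Prop :=
  n ≤ (arr1.length : Int) ∧ m ≤ (arr2.length : Int)
instance (t : Int) (n : Int) (arr1 : List Int) (m : Int) (arr2 : List Int) : Decidable (Pre_function t n arr1 m arr2) := by unfold Pre_function; infer_instance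
def pvWitness_function : Int × Int × List Int × Int × List Int := (3, 2, [1, 2], 2, [1, 2])

def Spec_function (t : Int) (n : Int) (arr1 : List Int) (m : Int) (arr2 : List Int) (out : Int) : Prop := out = function_alt t n arr1 m arr2
instance (t : Int) (n : Int) (arr1 : List Int) (m : Int) (arr2 : List Int) (out : Int) : Decidable (Spec_function t n arr1 m arr2 out) := by unfold Spec_function; infer_instance

-- ===== CLAIM (what is proved, stated in full; the proofs are below) =====
def Claim_equal_function : Prop := ∀ (t : Int) (n : Int) (arr1 : List Int) (m : Int) (arr2 : List Int), Dom_function t n arr1 m arr2 → Pre_function t n arr1 m arr2 → Spec_function t n arr1 m arr2 (function t n arr1 m arr2)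

-- ===== LEMMAS AND PROOFS =====

-- the common reference expression both programs are reduced to:
-- Σ over 0 ≤ i < j ≤ m of (number of subarray sums s of arr1 with s = t - sum(arr2[i:j]))
def refSum (t : Int) (n : Int) (arr1 : List Int) (m : Int) (arr2 : List Int) : Int :=
  (PySem.List.pyRange 0 m).foldl
    (fun ans i => (PySem.List.pyRange (i + 1) (m + 1)).foldl
      (fun ans j =>
        ans + ((subSums arr1 n).count (t - (PySem.List.slice arr2 (some i) (some j)).sum) : Int)) ans)
    0

-- A's prefix table after the build loop is the table of take-sums
theorem prefix_build_aux (xs : List Int) (N : Nat) (hN : N ≤ xs.length) (i : Nat) (hi : i ≤ N) :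
    (PySem.List.pyRange 1 ((i : Int) + 1)).foldl
      (fun p k => PySem.List.pySetD p k
        (PySem.List.pyGetD p (k - 1) 0 + PySem.List.pyGetD (0 :: xs) k 0))
      (List.replicate (N + 1) 0)
    = (List.range (i + 1)).map (fun k => ((xs.take k).sum : Int))
        ++ List.replicate (N - i) (0 : Int) := by
  induction i with
  | zero =>
      rw [PySem.List.pyRange_one_eq_nil (by norm_num)]
      simp [List.replicate_succ]
  | succ i ih =>
      have hi' : i ≤ N := by omega
      have hiN : i < N := by omega
      have hstep : ((i + 1 : Nat) : Int) + 1 = ((i : Int) + 1) + 1 := by push_cast; ring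
      rw [hstep, PySem.List.pyRange_one_succ_right (by omega), List.foldl_append,
        ih hi']
      set Q := (List.range (i + 1)).map (fun k => ((xs.take k).sum : Int))
          ++ List.replicate (N - i) (0 : Int) with hQ
      simp only [List.foldl_cons, List.foldl_nil]
      have e1 : (i : Int) + 1 - 1 = ((i : Nat) : Int) := by ring
      have hps : (xs.take (i + 1)).sum = (xs.take i).sum + xs.getD i 0 := by
        rw [List.take_add_one, List.sum_append,
          List.getElem?_eq_getElem (show i < xs.length by omega)]
        simp [List.getD_eq_getElem?_getD,
          List.getElem?_eq_getElem (show i < xs.length by omega)]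
      have egetQ : PySem.List.pyGetD Q ((i : Int) + 1 - 1) 0 = (xs.take i).sum := by
        rw [e1, PySem.List.pyGetD_natCast, hQ,
          List.getD_append _ _ _ _ (by simp)]
        exact PySem.List.getD_map_range _ _ _ _ (by omega)
      have egetA : PySem.List.pyGetD (0 :: xs) ((i : Int) + 1) 0 = xs.getD i 0 := by
        rw [show (i : Int) + 1 = ((i + 1 : Nat) : Int) by push_cast; ring,
          PySem.List.pyGetD_natCast]
        rfl
      have eset : PySem.List.pySetD Q ((i : Int) + 1) ((xs.take i).sum + xs.getD i 0)
          = (List.range (i + 1 + 1)).map (fun k => ((xs.take k).sum : Int))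
            ++ List.replicate (N - (i + 1)) (0 : Int) := by
        rw [show (i : Int) + 1 = ((i + 1 : Nat) : Int) by push_cast; ring,
          PySem.List.pySetD_natCast, hQ,
          List.set_append_right _ _ (by simp)]
        simp only [List.length_map, List.length_range, Nat.sub_self]
        rw [show N - i = (N - (i + 1)) + 1 by omega, List.replicate_succ,
          List.set_cons_zero]
        rw [List.range_succ, List.map_append, List.append_assoc]
        simp [List.range_succ, hps, List.getD_eq_getElem?_getD]
      rw [egetQ, egetA, eset]

-- lookup in the prefix-sum table A builds
theorem getD_prefix (xs : List Int) (N : Nat) (j : Int) (h0 : 0 ≤ j) (hj : j ≤ (N : Int)) :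
    PySem.List.pyGetD ((List.range (N + 1)).map (fun k => ((xs.take k).sum : Int))) j 0
      = (xs.take j.toNat).sum := by
  rw [PySem.List.pyGetD_of_nonneg _ _ h0]
  exact PySem.List.getD_map_range _ _ _ _ (by omega)

-- a slice sum is a difference of take-sums
theorem slice_sum_eq (xs : List Int) (i j : Nat) (hij : i ≤ j) :
    (PySem.List.slice xs (some (i : Int)) (some (j : Int))).sum
      = (xs.take j).sum - (xs.take i).sum := by
  rw [PySem.List.slice_natCast]
  have h := List.take_add (l := xs) (i := i) (j := j - i)
  rw [show i + (j - i) = j by omega] at h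
  rw [h, List.sum_append]
  ring

-- the difference of A's two prefix-table lookups is the slice sum, inside the loop bounds
theorem key_eq_slice (xs : List Int) (N : Nat) (hN : N ≤ xs.length) (i j : Int)
    (h0 : 0 ≤ i) (hij : i < j) (hj : j ≤ (N : Int) + 1 - 1) :
    PySem.List.pyGetD ((List.range (N + 1)).map (fun k => ((xs.take k).sum : Int))) j 0
      - PySem.List.pyGetD ((List.range (N + 1)).map (fun k => ((xs.take k).sum : Int))) i 0
      = (PySem.List.slice xs (some i) (some j)).sum := by
  have hj' : j ≤ (N : Int) := by omega
  rw [getD_prefix xs N j (by omega) hj', getD_prefix xs N i h0 (by omega)]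
  rw [show i = ((i.toNat : Nat) : Int) by omega, show j = ((j.toNat : Nat) : Int) by omega,
    slice_sum_eq xs i.toNat j.toNat (by omega)]
  rw [Int.toNat_natCast, Int.toNat_natCast]

-- a counting dict built by a nested insert loop, read back: lookups are counts in the flattened key list
theorem nested_insert_getD (outer : List Int) (inner : Int → List Int) (key : Int → Int → Int)
    (v : Int) (d : PySem.Dict Int Int) :
    (outer.foldl (fun d i => (inner i).foldl
        (fun d j => d.insert (key i j) (d.getD (key i j) 0 + 1)) d) d).getD v 0
      = d.getD v 0 + ((outer.flatMap (fun i => (inner i).map (key i))).count v : Int) := by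
  induction outer generalizing d with
  | nil => simp
  | cons a rest ih =>
      rw [List.foldl_cons, ih]
      have hmap : (inner a).foldl (fun d j => d.insert (key a j) (d.getD (key a j) 0 + 1)) d
          = ((inner a).map (key a)).foldl (fun d x => d.insert x (d.getD x 0 + 1)) d := by
        rw [List.foldl_map]
      rw [hmap, PySem.Dict.getD_foldl_insert_add_one]
      rw [List.flatMap_cons, List.count_append]
      push_cast
      ring

-- A's program equals the reference sum
theorem A_eq_ref (t n : Int) (arr1 : List Int) (m : Int) (arr2 : List Int)
    (hn : n ≤ (arr1.length : Int)) (hm : m ≤ (arr2.length : Int)) :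
    function t n arr1 m arr2 = refSum t n arr1 m arr2 := by
  simp only [function, refSum]
  by_cases hn0 : n < 0
  · have hsub : subSums arr1 n = [] := by
      unfold subSums
      rw [PySem.List.pyRange_one_eq_nil (le_of_lt hn0)]
      rfl
    rw [PySem.List.pyRange_one_eq_nil (le_of_lt hn0)]
    simp only [List.foldl_nil]
    apply PySem.List.foldl_congr_mem
    intro acc i _
    apply PySem.List.foldl_congr_mem
    intro acc2 j _
    rw [hsub]
    simp
  · push Not at hn0
    obtain ⟨N, rfl⟩ : ∃ N : Nat, n = (N : Int) := ⟨n.toNat, (Int.toNat_of_nonneg hn0).symm⟩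
    have hN : N ≤ arr1.length := by exact_mod_cast hn
    rw [show ((N : Int) + 1).toNat = N + 1 by omega]
    rw [prefix_build_aux arr1 N hN N (le_refl N)]
    simp only [Nat.sub_self, List.replicate_zero, List.append_nil]
    by_cases hm0 : m < 0
    · rw [PySem.List.pyRange_one_eq_nil (le_of_lt hm0)]
      simp only [List.foldl_nil]
    · push Not at hm0
      obtain ⟨M, rfl⟩ : ∃ M : Nat, m = (M : Int) := ⟨m.toNat, (Int.toNat_of_nonneg hm0).symm⟩
      have hM : M ≤ arr2.length := by exact_mod_cast hm
      rw [show ((M : Int) + 1).toNat = M + 1 by omega]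
      rw [prefix_build_aux arr2 M hM M (le_refl M)]
      simp only [Nat.sub_self, List.replicate_zero, List.append_nil]
      apply PySem.List.foldl_congr_mem
      intro acc i hi
      apply PySem.List.foldl_congr_mem
      intro acc2 j hj
      rw [PySem.List.mem_pyRange_one] at hi hj
      congr 1
      rw [key_eq_slice arr2 M hM i j (by omega) (by omega) (by omega)]
      rw [nested_insert_getD (PySem.List.pyRange 0 (N : Int))
        (fun i => PySem.List.pyRange (i + 1) ((N : Int) + 1))
        (fun i j =>
          PySem.List.pyGetD ((List.range (N + 1)).map (fun k => ((arr1.take k).sum : Int))) j 0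
            - PySem.List.pyGetD ((List.range (N + 1)).map (fun k => ((arr1.take k).sum : Int))) i 0)]
      have hK : (PySem.List.pyRange 0 (N : Int)).flatMap (fun i =>
            (PySem.List.pyRange (i + 1) ((N : Int) + 1)).map (fun j =>
              PySem.List.pyGetD ((List.range (N + 1)).map (fun k => ((arr1.take k).sum : Int))) j 0
                - PySem.List.pyGetD ((List.range (N + 1)).map (fun k => ((arr1.take k).sum : Int))) i 0))
          = subSums arr1 (N : Int) := by
        unfold subSums
        apply List.flatMap_congr
        intro a ha
        rw [PySem.List.mem_pyRange_one] at ha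
        apply List.map_congr_left
        intro b hb
        rw [PySem.List.mem_pyRange_one] at hb
        exact key_eq_slice arr1 N hN a b (by omega) (by omega) (by omega)
      rw [hK]
      simp

-- counting with two boundary predicates: countP(≤ v) = countP(< v) + count v
theorem countP_le_split (l : List Int) (v : Int) :
    l.countP (fun x => decide (x ≤ v))
      = l.countP (fun x => decide (x < v)) + l.count v := by
  induction l with
  | nil => simp
  | cons a l ih =>
      simp only [List.countP_cons, List.count_cons, ih]
      by_cases h : a = v
      · simp [h]; omega
      · have : (a == v) = false := by simp [h]
        rcases lt_or_gt_of_ne h with h' | h'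
        · simp [this, h'.le, h']; omega
        · simp [this, not_le.mpr h', not_lt.mpr h'.le]

-- the bisection invariant: on a list whose ok-region is a prefix delimited by [lo, hi),
-- 'bound' returns the number of ok elements
theorem bound_spec_aux (s1 : List Int) (ok : Int → Bool)
    (hmono : ∀ i j : Nat, (hi : i < s1.length) → (hj : j < s1.length) → i ≤ j →
      ok s1[j] → ok s1[i]) :
    ∀ d : Nat, ∀ lo hi : Int, (hi - lo).toNat = d → 0 ≤ lo → lo ≤ hi → hi ≤ (s1.length : Int) →
    (∀ k : Nat, (h : k < s1.length) → (k : Int) < lo → ok s1[k]) →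
    (∀ k : Nat, (h : k < s1.length) → hi ≤ (k : Int) → ¬ ok s1[k]) →
    bound s1 ok lo hi = (s1.countP ok : Int) := by
  intro d
  induction d using Nat.strong_induction_on with
  | _ d ih =>
    intro lo hi hd h0 hlh hhl hok hnot
    rw [bound]
    split_ifs with hlt hokb
    · have hml : lo ≤ PySem.Int.floordiv (lo + hi) 2 :=
        (PySem.Int.le_floordiv_iff_mul_le (by norm_num)).mpr (by linarith)
      have hmh : PySem.Int.floordiv (lo + hi) 2 < hi :=
        (PySem.Int.floordiv_lt_iff_lt_mul (by norm_num)).mpr (by linarith)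
      set mid := PySem.Int.floordiv (lo + hi) 2 with hmiddef
      have hmlen : mid.toNat < s1.length := by omega
      have hget : PySem.List.pyGetD s1 mid 0 = s1[mid.toNat] := by
        rw [PySem.List.pyGetD_of_nonneg _ _ (by omega)]
        exact List.getD_eq_getElem _ _ hmlen
      have hokm : ok s1[mid.toNat] := by rw [← hget]; exact hokb
      refine ih (hi - (mid + 1)).toNat (by omega) (mid + 1) hi rfl (by omega) (by omega) hhl
        ?_ hnot
      intro k hk hklt
      exact hmono k mid.toNat hk hmlen (by omega) hokm
    · have hml : lo ≤ PySem.Int.floordiv (lo + hi) 2 :=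
        (PySem.Int.le_floordiv_iff_mul_le (by norm_num)).mpr (by linarith)
      have hmh : PySem.Int.floordiv (lo + hi) 2 < hi :=
        (PySem.Int.floordiv_lt_iff_lt_mul (by norm_num)).mpr (by linarith)
      set mid := PySem.Int.floordiv (lo + hi) 2 with hmiddef
      have hmlen : mid.toNat < s1.length := by omega
      have hget : PySem.List.pyGetD s1 mid 0 = s1[mid.toNat] := by
        rw [PySem.List.pyGetD_of_nonneg _ _ (by omega)]
        exact List.getD_eq_getElem _ _ hmlen
      have hokm : ¬ ok s1[mid.toNat] := by rw [← hget]; exact hokb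
      refine ih (mid - lo).toNat (by omega) lo mid rfl h0 (by omega) (by omega) hok ?_
      intro k hk hkge hokk
      exact hokm (hmono mid.toNat k hmlen hk (by omega) hokk)
    · have hlo : lo = hi := le_antisymm hlh (not_lt.mp hlt)
      have h1 : (s1.take lo.toNat).countP ok = lo.toNat := by
        have hall : ∀ a ∈ s1.take lo.toNat, ok a := by
          intro a ha
          obtain ⟨k, hk, rfl⟩ := List.mem_iff_getElem.mp ha
          rw [List.getElem_take]
          exact hok k (by simp at hk; omega) (by simp at hk; omega)
        rw [List.countP_eq_length.mpr hall, List.length_take]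
        omega
      have h2 : (s1.drop lo.toNat).countP ok = 0 := by
        apply List.countP_eq_zero.mpr
        intro a ha
        obtain ⟨k, hk, rfl⟩ := List.mem_iff_getElem.mp ha
        rw [List.getElem_drop]
        exact hnot _ (by simp at hk; omega) (by omega)
      have key : s1.countP ok = (s1.take lo.toNat ++ s1.drop lo.toNat).countP ok := by
        rw [List.take_append_drop]
      rw [key, List.countP_append, h1, h2]
      omega

-- 'bound' over the whole sorted list counts the ok elements
theorem bound_spec (s1 : List Int) (ok : Int → Bool)
    (hmono : ∀ i j : Nat, (hi : i < s1.length) → (hj : j < s1.length) → i ≤ j →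
      ok s1[j] → ok s1[i]) :
    bound s1 ok 0 (PySem.List.len s1) = (s1.countP ok : Int) := by
  refine bound_spec_aux s1 ok hmono ((PySem.List.len s1 - 0).toNat) 0 (PySem.List.len s1)
    rfl le_rfl (by simp [PySem.List.len]) (by simp [PySem.List.len]) ?_ ?_
  · intro k _ hk; omega
  · intro k h hk; exfalso; simp [PySem.List.len] at hk; omega

-- B's program equals the reference sum
theorem B_eq_ref (t n : Int) (arr1 : List Int) (m : Int) (arr2 : List Int) :
    function_alt t n arr1 m arr2 = refSum t n arr1 m arr2 := by
  simp only [function_alt, refSum]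
  apply PySem.List.foldl_congr_mem
  intro acc i _
  apply PySem.List.foldl_congr_mem
  intro acc2 j _
  congr 1
  set L := subSums arr1 n with hL
  set v := t - (PySem.List.slice arr2 (some i) (some j)).sum with hv
  have hmle : ∀ p q : Nat, (hp : p < (PySem.List.sorted L (fun x => x) false).length) →
      (hq : q < (PySem.List.sorted L (fun x => x) false).length) → p ≤ q →
      (fun x => decide (x ≤ v)) (PySem.List.sorted L (fun x => x) false)[q] →
      (fun x => decide (x ≤ v)) (PySem.List.sorted L (fun x => x) false)[p] := by
    intro p q hp hq hpq hok
    simp only [decide_eq_true_eq] at *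
    exact le_trans (PySem.List.sorted_id_getElem_mono L hpq hq) hok
  have hmlt : ∀ p q : Nat, (hp : p < (PySem.List.sorted L (fun x => x) false).length) →
      (hq : q < (PySem.List.sorted L (fun x => x) false).length) → p ≤ q →
      (fun x => decide (x < v)) (PySem.List.sorted L (fun x => x) false)[q] →
      (fun x => decide (x < v)) (PySem.List.sorted L (fun x => x) false)[p] := by
    intro p q hp hq hpq hok
    simp only [decide_eq_true_eq] at *
    exact lt_of_le_of_lt (PySem.List.sorted_id_getElem_mono L hpq hq) hok
  rw [bound_spec _ _ hmle, bound_spec _ _ hmlt]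
  have hsplit := countP_le_split (PySem.List.sorted L (fun x => x) false) v
  have hcnt := (PySem.List.sorted_perm L (fun x => x) false).count_eq v
  omega

-- ===== VERDICT (by name: the statement is the Claim_ definition above) =====
theorem function_spec : Claim_equal_function := by
  intro t n arr1 m arr2 _ hpre
  unfold Spec_function
  rw [A_eq_ref t n arr1 m arr2 hpre.1 hpre.2, B_eq_ref]
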